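-- pv_equiv track=rewrite | github.com/drdanovak/TriNetXForestPlot | TriNetXForestPlot.py | extract_section_value_map
-- ===== SOURCE A (Python) =====
-- def clean_cell(value):
--     if value is None:
--         return ""
--     text = str(value).replace("\ufeff", "").strip()
--     text = text.strip('"').strip()
--     return text
--
-- def next_nonblank_row(rows, start_idx):
--     for idx in range(start_idx, len(rows)):
--         if any(clean_cell(cell) for cell in rows[idx]):
--             return idx
--     return None
--
-- def extract_section_value_map(rows, section_name):
--     for i, row in enumerate(rows):
--         first = clean_cell(next((cell for cell in row if clean_cell(cell)), ""))
--         if first == section_name: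
--             header_idx = next_nonblank_row(rows, i + 1)
--             data_idx = next_nonblank_row(rows, (header_idx + 1) if header_idx is not None else i + 1)
--             if header_idx is None or data_idx is None:
--                 return None
--             headers = [clean_cell(x) for x in rows[header_idx]]
--             values = [clean_cell(x) for x in rows[data_idx]]
--             out = {}
--             for h, v in zip(headers, values):
--                 if h:
--                     out[h] = v
--             return out
--     return None
-- ===== SOURCE B (Python) =====
-- def clean_cell(value):
--     if value is None:
--         return ""
--     text = str(value).replace("\ufeff", "").strip()
--     text = text.strip('"').strip()
--     return text
--
-- def extract_section_value_map(rows, section_name):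
--     # Single-pass state machine: 0 = searching for the section title,
--     # 1 = waiting for the header row, 2 = waiting for the data row.
--     state = 0
--     headers = None
--     for row in rows:
--         cleaned = [clean_cell(c) for c in row]
--         if state == 0:
--             first = next((c for c in cleaned if c), "")
--             if first == section_name:
--                 state = 1
--         elif any(cleaned):
--             if state == 1:
--                 headers = cleaned
--                 state = 2
--             else:
--                 return {h: v for h, v in zip(headers, cleaned) if h}
--     return None
-- ===== Notes on version B (the rewrite author's own statement) =====
-- stated objective: simpler
-- what changed: Replaces the outer index loop plus two next_nonblank_row lookahead scans (which re-read rows by global index) with a single linear pass carrying an explicit state (searching / need-header / need-data), so each row is visited and cleaned once and no index arithmetic or lookahead helper is needed.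
import Mathlib
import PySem

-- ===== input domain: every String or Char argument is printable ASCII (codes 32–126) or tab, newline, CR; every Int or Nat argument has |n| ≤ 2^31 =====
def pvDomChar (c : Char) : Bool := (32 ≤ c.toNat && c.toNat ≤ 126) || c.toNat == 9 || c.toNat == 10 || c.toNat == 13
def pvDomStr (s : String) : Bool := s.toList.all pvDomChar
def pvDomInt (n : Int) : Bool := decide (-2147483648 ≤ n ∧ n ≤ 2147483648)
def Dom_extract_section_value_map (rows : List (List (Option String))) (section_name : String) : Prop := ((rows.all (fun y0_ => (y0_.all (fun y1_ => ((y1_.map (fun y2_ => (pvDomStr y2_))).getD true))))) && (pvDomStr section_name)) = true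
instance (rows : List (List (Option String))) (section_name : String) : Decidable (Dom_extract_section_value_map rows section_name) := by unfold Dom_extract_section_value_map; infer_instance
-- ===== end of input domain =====

-- B replaces A's outer index loop plus two next_nonblank_row lookahead scans by a single
-- linear pass carrying an explicit state (searching / need-header / need-data): simpler, same cost.

-- ===== PORT A =====
-- clean_cell (shared module helper, used by both Python versions verbatim)
def cleanCell (v : Option String) : String :=
  match v with
  | none => ""
  | some s =>
    let text := PySem.Str.strip (PySem.Str.replace s "\ufeff" "")
    PySem.Str.strip (PySem.Str.stripChars text "\"")

-- next_nonblank_row's scan from index `start`: iterates over rows[start:], tracking the index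
def nextNonblankAux : List (List (Option String)) → Nat → Option Nat
  | [], _ => none
  | row :: rest, idx =>
    if row.any (fun c => cleanCell c != "") then some idx else nextNonblankAux rest (idx + 1)

def nextNonblankRow (rows : List (List (Option String))) (start : Nat) : Option Nat :=
  nextNonblankAux (rows.drop start) start

def loopA (rows : List (List (Option String))) (sec : String) :
    List (List (Option String)) → Nat → Option (List (String × String))
  | [], _ => none
  | row :: rest, i =>
    let first := match row.find? (fun c => cleanCell c != "") with
      | some cell => cleanCell cell
      | none => cleanCell (some "")
    if first = sec then
      let header_idx := nextNonblankRow rows (i + 1)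
      let data_idx := nextNonblankRow rows (match header_idx with | some h => h + 1 | none => i + 1)
      match header_idx, data_idx with
      | some h, some d =>
        let headers := (rows.getD h []).map cleanCell
        let values := (rows.getD d []).map cleanCell
        some (((headers.zip values).foldl
          (fun dd p => if p.1 != "" then dd.insert p.1 p.2 else dd)
          (PySem.Dict.empty : PySem.Dict String String)).items)
      | _, _ => none
    else loopA rows sec rest (i + 1)

def extract_section_value_map (rows : List (List (Option String))) (section_name : String) : Option (List (String × String)) :=
  loopA rows section_name rows 0

-- ===== PORT B =====
-- state need_data: headers fixed, waiting for the next non-blank row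
def bData (headers : List String) : List (List (Option String)) → Option (List (String × String))
  | [] => none
  | row :: rest =>
    let cleaned := row.map cleanCell
    if cleaned.any (· != "") then
      some ((((headers.zip cleaned).filter (fun p => p.1 != "")).foldl
        (fun d p => d.insert p.1 p.2)
        (PySem.Dict.empty : PySem.Dict String String)).items)
    else bData headers rest

-- state need_header: waiting for the first non-blank row, which becomes the header row
def bHeader : List (List (Option String)) → Option (List (String × String))
  | [] => none
  | row :: rest =>
    let cleaned := row.map cleanCell
    if cleaned.any (· != "") then bData cleaned rest else bHeader rest

-- state searching: looking for the section-title row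
def bSearch (sec : String) : List (List (Option String)) → Option (List (String × String))
  | [] => none
  | row :: rest =>
    let cleaned := row.map cleanCell
    let first := (cleaned.find? (· != "")).getD ""
    if first = sec then bHeader rest else bSearch sec rest

def extract_section_value_map_alt (rows : List (List (Option String))) (section_name : String) : Option (List (String × String)) :=
  bSearch section_name rows

-- ===== PRECONDITION & SPEC =====
def Spec_extract_section_value_map (rows : List (List (Option String))) (section_name : String) (out : Option (List (String × String))) : Prop := out = extract_section_value_map_alt rows section_name
instance (rows : List (List (Option String))) (section_name : String) (out : Option (List (String × String))) : Decidable (Spec_extract_section_value_map rows section_name out) := by unfold Spec_extract_section_value_map; infer_instance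

-- ===== CLAIM (what is proved, stated in full; the proofs are below) =====
def Claim_equal_extract_section_value_map : Prop := ∀ (rows : List (List (Option String))) (section_name : String), Dom_extract_section_value_map rows section_name → Spec_extract_section_value_map rows section_name (extract_section_value_map rows section_name)

-- ===== LEMMAS AND PROOFS =====

def isNB (row : List (Option String)) : Bool := row.any (fun c => cleanCell c != "")

theorem anyMap_eq (row : List (Option String)) :
    (row.map cleanCell).any (· != "") = isNB row := by
  simp only [isNB, List.any_map]
  rfl

theorem first_eq (row : List (Option String)) :
    ((row.map cleanCell).find? (· != "")).getD "" =
      (match row.find? (fun c => cleanCell c != "") with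
       | some cell => cleanCell cell
       | none => cleanCell (some "")) := by
  induction row with
  | nil => decide
  | cons c cs ih =>
    simp only [List.map_cons]
    cases h : (cleanCell c != "") with
    | true =>
      rw [List.find?_cons_of_pos (by simp [h]), List.find?_cons_of_pos (by simp [h])]
      simp
    | false =>
      rw [List.find?_cons_of_neg (by simp [h]), List.find?_cons_of_neg (by simp [h])]
      exact ih

theorem nnbAux_eq (l : List (List (Option String))) (i0 : Nat) :
    nextNonblankAux l i0 = (l.findIdx? isNB).map (· + i0) := by
  induction l generalizing i0 with
  | nil => rfl
  | cons row rest ih =>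
    cases h : (row.any fun c => cleanCell c != "") with
    | true => simp [nextNonblankAux, List.findIdx?_cons, isNB, h]
    | false =>
      simp only [nextNonblankAux, List.findIdx?_cons, isNB, h, Bool.false_eq_true, if_false,
        ih, Option.map_map]
      congr 1
      funext k
      simp only [Function.comp_apply]
      omega

theorem getD_drop' (l : List (List (Option String))) (m k : Nat) :
    (l.drop m).getD k [] = l.getD (m + k) [] := by
  simp [List.getD_eq_getElem?_getD, List.getElem?_drop]

theorem bData_eq (hd : List String) (l : List (List (Option String))) :
    bData hd l = (match l.findIdx? isNB with
      | none => none
      | some k => some ((((hd.zip ((l.getD k []).map cleanCell)).filter (fun p => p.1 != "")).foldl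
          (fun d p => d.insert p.1 p.2)
          (PySem.Dict.empty : PySem.Dict String String)).items)) := by
  induction l with
  | nil => rfl
  | cons row rest ih =>
    rw [bData, anyMap_eq, List.findIdx?_cons]
    by_cases h : isNB row = true
    · simp [h]
    · simp only [Bool.not_eq_true] at h
      rw [h]
      simp only [Bool.false_eq_true, if_false, ih]
      cases hr : rest.findIdx? isNB <;> simp

theorem bHeader_eq (l : List (List (Option String))) :
    bHeader l = (match l.findIdx? isNB with
      | none => none
      | some k => bData ((l.getD k []).map cleanCell) (l.drop (k + 1))) := by
  induction l with
  | nil => rfl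
  | cons row rest ih =>
    rw [bHeader, anyMap_eq, List.findIdx?_cons]
    by_cases h : isNB row = true
    · simp [h]
    · simp only [Bool.not_eq_true] at h
      rw [h]
      simp only [Bool.false_eq_true, if_false, ih]
      cases hr : rest.findIdx? isNB <;> simp

theorem dict_fold_eq (pairs : List (String × String)) :
    pairs.foldl (fun dd p => if p.1 != "" then dd.insert p.1 p.2 else dd)
      (PySem.Dict.empty : PySem.Dict String String) =
    (pairs.filter (fun p => p.1 != "")).foldl (fun d p => d.insert p.1 p.2)
      (PySem.Dict.empty : PySem.Dict String String) := by
  rw [List.foldl_filter]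

theorem loopA_eq (rows : List (List (Option String))) (sec : String) :
    ∀ (l : List (List (Option String))) (i : Nat), l = rows.drop i →
      loopA rows sec l i = bSearch sec l := by
  intro l
  induction l with
  | nil => intro i _; rfl
  | cons row rest ih =>
    intro i hdrop
    have hrest : rest = rows.drop (i + 1) := by
      have := congrArg (List.drop 1) hdrop
      simpa [List.drop_drop, Nat.add_comm] using this
    rw [loopA, bSearch]
    simp only [first_eq]
    by_cases hm : (match row.find? (fun c => cleanCell c != "") with
       | some cell => cleanCell cell
       | none => cleanCell (some "")) = sec
    · rw [if_pos hm, if_pos hm]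
      rw [bHeader_eq]
      have hnnb1 : nextNonblankRow rows (i + 1) = (rest.findIdx? isNB).map (· + (i + 1)) := by
        rw [nextNonblankRow, ← hrest, nnbAux_eq]
      cases hk : rest.findIdx? isNB with
      | none => simp [hnnb1, hk]
      | some k =>
        simp only [hnnb1, hk, Option.map_some]
        have hget : rows.getD (k + (i + 1)) [] = rest.getD k [] := by
          rw [hrest, getD_drop', Nat.add_comm]
        have hdrop2 : rows.drop (k + (i + 1) + 1) = rest.drop (k + 1) := by
          rw [hrest, List.drop_drop]
          congr 1
          omega
        rw [bData_eq]
        have hnnb2 : nextNonblankRow rows (k + (i + 1) + 1) =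
            ((rest.drop (k + 1)).findIdx? isNB).map (· + (k + (i + 1) + 1)) := by
          rw [nextNonblankRow, hdrop2, nnbAux_eq]
        rw [hnnb2]
        cases hk2 : (rest.drop (k + 1)).findIdx? isNB with
        | none => rfl
        | some k2 =>
          simp only [Option.map_some]
          have hget2 : rows.getD (k2 + (k + (i + 1) + 1)) [] = (rest.drop (k + 1)).getD k2 [] := by
            rw [hrest, List.drop_drop, getD_drop']
            congr 1
            omega
          rw [hget, hget2, dict_fold_eq]
    · rw [if_neg hm, if_neg hm]
      exact ih (i + 1) hrest

-- ===== VERDICT (by name: the statement is the Claim_ definition above) =====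
theorem extract_section_value_map_spec : Claim_equal_extract_section_value_map := by
  intro rows sec _
  unfold Spec_extract_section_value_map extract_section_value_map extract_section_value_map_alt
  exact loopA_eq rows sec rows 0 rfl
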